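-- pv_equiv track=rewrite | github.com/Arsen1302/Code-copy-detector | TestData/solutions/problem_103_5_1.py | solution_103_5_1
-- ===== SOURCE A (Python) =====
-- from typing import List
--
-- def solution_103_5_1(k: int, n: int) -> List[List[int]]:
--
--     answer = []
--     path = []
--
--     def solution_103_5_2(idx, total):
--         if len(path) > k:
--             return
--         if total > n:
--             return
--         if total == n and len(path) == k:
--             answer.append(path.copy())
--             return
--
--         for i in range(idx, 10):
--             path.append(i)
--             solution_103_5_2(i+1, total + i)
--             path.pop()
--
--     solution_103_5_2(1, 0)
--     return  answer
-- ===== SOURCE B (Python) =====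
-- from itertools import combinations
-- from typing import List
--
-- def solution_103_5_1(k: int, n: int) -> List[List[int]]:
--     if not 0 <= k <= 9:
--         return []  # no k-element subset of the 9 digits exists (and combinations rejects r < 0)
--     return [list(c) for c in combinations(range(1, 10), k) if sum(c) == n]
-- ===== Notes on version B (the rewrite author's own statement) =====
-- stated objective: idiomatic
-- what changed: Replaced the recursive pruned backtracking over a shared mutable path with a flat generate-and-filter over itertools.combinations(range(1,10), k), which yields the same combinations in the same lexicographic order.
import Mathlib
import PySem

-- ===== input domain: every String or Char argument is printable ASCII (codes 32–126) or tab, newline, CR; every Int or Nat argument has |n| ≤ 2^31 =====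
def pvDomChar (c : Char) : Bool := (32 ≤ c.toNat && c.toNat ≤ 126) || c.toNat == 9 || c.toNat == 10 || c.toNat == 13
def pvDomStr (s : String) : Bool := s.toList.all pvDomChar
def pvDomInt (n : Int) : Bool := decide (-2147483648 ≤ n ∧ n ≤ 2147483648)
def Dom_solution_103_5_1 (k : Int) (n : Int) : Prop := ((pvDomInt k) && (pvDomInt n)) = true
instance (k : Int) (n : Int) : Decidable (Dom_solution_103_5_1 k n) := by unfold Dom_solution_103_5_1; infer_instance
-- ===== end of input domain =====

-- B replaces A's recursive pruned backtracking by flat generate-and-filter over all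
-- k-element combinations of 1..9 (itertools.combinations order = lex order); objective: idiomatic.

-- ===== PORT A =====
-- A's nested recursive backtracker; the fuel argument only makes the recursion structural
-- (idx starts at 1 and strictly increases, so fuel 11 is never exhausted).
def solA_loop (k n : Int) : Nat → Int → Int → List Int → List (List Int) → List (List Int)
  | 0, _, _, _, answer => answer
  | fuel+1, idx, total, path, answer =>
    if (path.length : Int) > k then answer
    else if total > n then answer
    else if total = n ∧ (path.length : Int) = k then answer ++ [path]
    else (PySem.List.pyRange idx 10 1).foldl
      (fun acc i => solA_loop k n fuel (i+1) (total + i) (path ++ [i]) acc) answer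

def solution_103_5_1 (k : Int) (n : Int) : List (List Int) :=
  solA_loop k n 11 1 0 [] []

-- ===== PORT B =====
-- itertools.combinations(xs, j) in its lexicographic yield order
def combosB : Nat → List Int → List (List Int)
  | 0, _ => [[]]
  | _+1, [] => []
  | j+1, x :: xs => ((combosB j xs).map (fun c => x :: c)) ++ combosB (j+1) xs

def solution_103_5_1_alt (k : Int) (n : Int) : List (List Int) :=
  if k < 0 ∨ 9 < k then []
  else (combosB k.toNat [1, 2, 3, 4, 5, 6, 7, 8, 9]).filter (fun c => c.sum == n)

-- ===== PRECONDITION & SPEC =====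
def Spec_solution_103_5_1 (k : Int) (n : Int) (out : List (List Int)) : Prop := out = solution_103_5_1_alt k n
instance (k : Int) (n : Int) (out : List (List Int)) : Decidable (Spec_solution_103_5_1 k n out) := by unfold Spec_solution_103_5_1; infer_instance

-- ===== CLAIM (what is proved, stated in full; the proofs are below) =====
def Claim_equal_solution_103_5_1 : Prop := ∀ (k : Int) (n : Int), Dom_solution_103_5_1 k n → Spec_solution_103_5_1 k n (solution_103_5_1 k n)

-- ===== LEMMAS AND PROOFS =====

lemma combosB_eq_nil : ∀ (l : List Int) (j : Nat), l.length < j → combosB j l = [] := by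
  intro l
  induction l with
  | nil =>
    intro j h
    cases j with
    | zero => omega
    | succ j => simp [combosB]
  | cons x xs IH =>
    intro j h
    cases j with
    | zero => omega
    | succ j =>
      simp only [List.length_cons] at h
      simp [combosB, IH j (by omega), IH (j+1) (by omega)]

lemma combosB_sum_nonneg : ∀ (l : List Int), (∀ x ∈ l, 0 ≤ x) →
    ∀ (j : Nat), ∀ c ∈ combosB j l, 0 ≤ c.sum := by
  intro l
  induction l with
  | nil =>
    intro _ j c hc
    cases j with
    | zero => simp [combosB] at hc; simp [hc]
    | succ j => simp [combosB] at hc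
  | cons x xs IH =>
    intro h j c hc
    cases j with
    | zero => simp [combosB] at hc; simp [hc]
    | succ j =>
      simp only [combosB, List.mem_append, List.mem_map] at hc
      rcases hc with ⟨c', hc', rfl⟩ | hc
      · have hx : 0 ≤ x := h x (by simp)
        have := IH (fun y hy => h y (by simp [hy])) j c' hc'
        simp only [List.sum_cons]
        omega
      · exact IH (fun y hy => h y (by simp [hy])) (j+1) c hc

-- the loop over range(idx,10) builds exactly the (j'+1)-element combinations of [idx..9]
lemma flatMap_combos (nval total : Int) (path : List Int) (j' : Nat) :
    ∀ (m : Nat) (idx : Int), 1 ≤ idx → (10 - idx).toNat = m →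
    (PySem.List.pyRange idx 10 1).flatMap
      (fun i => if total + i ≤ nval then
          ((combosB j' (PySem.List.pyRange (i+1) 10 1)).filter
            (fun c => c.sum + (total + i) == nval)).map (fun c => (path ++ [i]) ++ c)
        else [])
    = ((combosB (j'+1) (PySem.List.pyRange idx 10 1)).filter
        (fun c => c.sum + total == nval)).map (fun c => path ++ c) := by
  intro m
  induction m with
  | zero =>
    intro idx h1 hm
    have hr : PySem.List.pyRange idx 10 1 = [] := by
      rw [PySem.List.pyRange_one]
      have : ((10 : Int) - idx).toNat = 0 := hm
      simp [this]
    simp [hr, combosB]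
  | succ m IH =>
    intro idx h1 hm
    have hidx : idx < 10 := by omega
    rw [PySem.List.pyRange_one_cons hidx]
    have hnn : ∀ c ∈ combosB j' (PySem.List.pyRange (idx+1) 10 1), 0 ≤ c.sum := by
      intro c hc
      refine combosB_sum_nonneg _ ?_ j' c hc
      intro x hx
      have := (PySem.List.mem_pyRange_one).1 hx
      omega
    simp only [List.flatMap_cons, combosB, List.filter_append, List.map_append]
    have h2 : (PySem.List.pyRange (idx+1) 10 1).flatMap
        (fun i => if total + i ≤ nval then
          ((combosB j' (PySem.List.pyRange (i+1) 10 1)).filter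
            (fun c => c.sum + (total + i) == nval)).map (fun c => (path ++ [i]) ++ c)
        else [])
        = ((combosB (j'+1) (PySem.List.pyRange (idx+1) 10 1)).filter
            (fun c => c.sum + total == nval)).map (fun c => path ++ c) :=
      IH (idx+1) (by omega) (by omega)
    rw [h2]
    congr 1
    -- head part
    rw [List.filter_map, List.map_map]
    have hpred : ((fun c : List Int => c.sum + total == nval) ∘ (fun c => idx :: c))
        = (fun c : List Int => c.sum + (total + idx) == nval) := by
      funext c
      simp only [Function.comp_apply, List.sum_cons]
      congr 1
      omega
    have hfun : ((fun c : List Int => path ++ c) ∘ (fun c => idx :: c))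
        = (fun c : List Int => (path ++ [idx]) ++ c) := by
      funext c
      simp
    rw [hpred, hfun]
    by_cases hg : total + idx ≤ nval
    · rw [if_pos hg]
    · rw [if_neg hg]
      have : (combosB j' (PySem.List.pyRange (idx+1) 10 1)).filter
          (fun c : List Int => c.sum + (total + idx) == nval) = [] := by
        rw [List.filter_eq_nil_iff]
        intro c hc
        have := hnn c hc
        simp only [beq_iff_eq]
        omega
      rw [this]
      simp

-- characterisation of A's backtracker as filter-of-combinations
lemma solA_loop_eq (k n : Int) (fuel : Nat) :
    ∀ (idx total : Int) (path : List Int) (ans : List (List Int)),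
    1 ≤ idx → (10 - idx).toNat < fuel →
    solA_loop k n fuel idx total path ans =
      ans ++ (if (path.length : Int) ≤ k ∧ total ≤ n then
        ((combosB (k - path.length).toNat (PySem.List.pyRange idx 10 1)).filter
          (fun c => c.sum + total == n)).map (fun c => path ++ c)
      else []) := by
  induction fuel with
  | zero => intro idx total path ans h1 hf; omega
  | succ fuel IH =>
    intro idx total path ans h1 hf
    simp only [solA_loop]
    by_cases hA : (path.length : Int) > k
    · rw [if_pos hA, if_neg (by omega)]
      simp
    · rw [if_neg hA]
      by_cases hB : total > n
      · rw [if_pos hB, if_neg (by omega)]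
        simp
      · rw [if_neg hB]
        by_cases hC : total = n ∧ (path.length : Int) = k
        · rw [if_pos hC, if_pos ⟨by omega, by omega⟩]
          have hz : (k - (path.length : Int)).toNat = 0 := by omega
          rw [hz]
          simp [combosB, hC.1]
        · rw [if_neg hC, if_pos ⟨by omega, by omega⟩]
          -- rewrite each loop iteration with the IH
          have hstep : ∀ (acc : List (List Int)), ∀ i ∈ PySem.List.pyRange idx 10 1,
              solA_loop k n fuel (i+1) (total + i) (path ++ [i]) acc
                = acc ++ (if ((path.length : Int) + 1 ≤ k ∧ total + i ≤ n) then
                    ((combosB (k - (path.length : Int) - 1).toNat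
                        (PySem.List.pyRange (i+1) 10 1)).filter
                      (fun c => c.sum + (total + i) == n)).map (fun c => (path ++ [i]) ++ c)
                  else []) := by
            intro acc i hi
            have hib := (PySem.List.mem_pyRange_one).1 hi
            have h := IH (i+1) (total + i) (path ++ [i]) acc (by omega) (by omega)
            simp only [List.length_append, List.length_cons, List.length_nil, Nat.cast_add,
              Nat.cast_one, zero_add] at h
            rw [show k - ((path.length : Int) + 1) = k - (path.length : Int) - 1 from by ring] at h
            exact h
          rw [PySem.List.foldl_congr_mem (PySem.List.pyRange idx 10 1) _ _ ans hstep]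
          rw [PySem.List.foldl_append_eq_flatMap]
          congr 1
          by_cases hlen : (path.length : Int) + 1 ≤ k
          · -- still room: the loop produces the (j'+1)-combinations
            have hj : (k - (path.length : Int)).toNat = (k - (path.length : Int) - 1).toNat + 1 := by
              omega
            rw [hj]
            rw [← flatMap_combos n total path ((k - (path.length : Int) - 1).toNat)
              ((10 - idx).toNat) idx h1 rfl]
            refine List.flatMap_congr ?_
            intro i _
            rw [if_congr (and_iff_right hlen) rfl rfl]
          · -- path already full but sum short: nothing can be appended on either side
            have hz : (k - (path.length : Int)).toNat = 0 := by omega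
            rw [hz]
            have htn : total ≠ n := fun h => hC ⟨h, by omega⟩
            have hr : (combosB 0 (PySem.List.pyRange idx 10 1)).filter
                (fun c => c.sum + total == n) = [] := by
              simp [combosB, htn]
            rw [hr]
            simp only [List.map_nil]
            rw [List.flatMap_eq_nil_iff.2]
            intro x hx
            rw [if_neg (by omega)]

-- ===== VERDICT (by name: the statement is the Claim_ definition above) =====
theorem solution_103_5_1_spec : Claim_equal_solution_103_5_1 := by
  intro k n _
  unfold Spec_solution_103_5_1 solution_103_5_1 solution_103_5_1_alt
  rw [solA_loop_eq k n 11 1 0 [] [] (by omega) (by decide)]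
  have hR : PySem.List.pyRange 1 10 1 = [1, 2, 3, 4, 5, 6, 7, 8, 9] := by decide
  rw [hR]
  by_cases hk : k < 0 ∨ 9 < k
  · rw [if_pos hk]
    rcases hk with hk | hk
    · rw [if_neg (by simp; omega)]
      simp
    · rw [show ((k : Int) - ([] : List Int).length).toNat = k.toNat from by simp]
      rw [combosB_eq_nil [1, 2, 3, 4, 5, 6, 7, 8, 9] k.toNat (by simp; omega)]
      simp
  · rw [if_neg hk]
    rw [not_or, not_lt, not_lt] at hk
    by_cases hn : 0 ≤ n
    · rw [if_pos ⟨by simp; omega, by simpa using hn⟩]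
      simp
    · rw [if_neg (by simp; omega)]
      have : (combosB k.toNat [1, 2, 3, 4, 5, 6, 7, 8, 9]).filter (fun c => c.sum == n) = [] := by
        rw [List.filter_eq_nil_iff]
        intro c hc
        have := combosB_sum_nonneg [1, 2, 3, 4, 5, 6, 7, 8, 9] (by decide) k.toNat c hc
        simp only [beq_iff_eq]
        omega
      rw [this]
      simp
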